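-- pv_equiv track=rewrite | github.com/pymodproject/pymod | pymod3/pymod_lib/pymod_seq/seq_manipulation.py | get_residue_id_in_aligned_sequence
-- ===== SOURCE A (Python) =====
-- def get_residue_id_in_aligned_sequence(aligned_sequence, real_id):
--     """
--     aligned_sequence: a sequence with indels.
--     real_id: the id (position -1) of the residue in the gapless sequence.
--     returns: the id (position -1) of the same residue in the alignment (the sequence + indels).
--     """
--     assert( len(str(aligned_sequence).replace("-","")) >= real_id )
--     real_counter = 0
--     for i,p in enumerate(aligned_sequence):
--         if p != "-":
--             if real_counter == real_id:
--                 return i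
--             else:
--                 real_counter += 1
-- ===== SOURCE B (Python) =====
-- def get_residue_id_in_aligned_sequence(aligned_sequence, real_id):
--     assert( len(str(aligned_sequence).replace("-","")) >= real_id )
--     positions = [i for i, p in enumerate(aligned_sequence) if p != "-"]
--     if 0 <= real_id < len(positions):
--         return positions[real_id]
-- ===== Notes on version B (the rewrite author's own statement) =====
-- stated objective: alternative
-- what changed: Replaces the counter-based scan with early return by building the table of all non-gap alignment indices in one comprehension and doing a bounds-checked lookup at real_id.
import Mathlib
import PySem

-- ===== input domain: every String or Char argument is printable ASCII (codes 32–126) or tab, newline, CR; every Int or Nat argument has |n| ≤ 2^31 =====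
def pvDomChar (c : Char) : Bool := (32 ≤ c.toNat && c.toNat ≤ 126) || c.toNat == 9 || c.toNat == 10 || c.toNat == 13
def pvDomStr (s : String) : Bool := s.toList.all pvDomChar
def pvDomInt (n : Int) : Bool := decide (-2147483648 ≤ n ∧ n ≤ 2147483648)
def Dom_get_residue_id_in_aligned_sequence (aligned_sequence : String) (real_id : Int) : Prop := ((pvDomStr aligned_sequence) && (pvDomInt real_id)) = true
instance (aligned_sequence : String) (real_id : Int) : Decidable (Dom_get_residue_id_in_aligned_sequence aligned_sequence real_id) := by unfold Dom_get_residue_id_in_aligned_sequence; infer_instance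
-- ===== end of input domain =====

-- B builds the table of non-gap alignment indices once and looks up real_id with a bounds check,
-- instead of A's counter-based scan with early return. Return-value equivalence on Pre_ (assert holds).

-- ===== PORT A =====
-- the for-loop over enumerate(aligned_sequence) with counter `real_counter` and early return
def pvA_loop : List (Int × Char) → Int → Int → Option Int
  | [], _, _ => none
  | (i, p) :: rest, real_id, real_counter =>
    if p ≠ '-' then
      if real_counter = real_id then some i
      else pvA_loop rest real_id (real_counter + 1)
    else pvA_loop rest real_id real_counter

def get_residue_id_in_aligned_sequence (aligned_sequence : String) (real_id : Int) : Option Int :=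
  pvA_loop (PySem.List.enumerate aligned_sequence.toList) real_id 0

-- ===== PORT B =====
def get_residue_id_in_aligned_sequence_alt (aligned_sequence : String) (real_id : Int) : Option Int :=
  let positions : List Int :=
    (PySem.List.enumerate aligned_sequence.toList).filterMap
      (fun ip => if ip.2 ≠ '-' then some ip.1 else none)
  if 0 ≤ real_id ∧ real_id < (positions.length : Int) then positions[real_id.toNat]? else none

-- ===== PRECONDITION & SPEC =====
-- excludes exactly the inputs on which A's assert fails (real_id greater than the non-gap length)
def Pre_get_residue_id_in_aligned_sequence (aligned_sequence : String) (real_id : Int) : Prop :=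
  real_id ≤ PySem.Str.len (PySem.Str.replace aligned_sequence "-" "")
instance (aligned_sequence : String) (real_id : Int) : Decidable (Pre_get_residue_id_in_aligned_sequence aligned_sequence real_id) := by unfold Pre_get_residue_id_in_aligned_sequence; infer_instance
def pvWitness_get_residue_id_in_aligned_sequence : String × Int := ("a-bc", 2)
def Spec_get_residue_id_in_aligned_sequence (aligned_sequence : String) (real_id : Int) (out : Option Int) : Prop := out = get_residue_id_in_aligned_sequence_alt aligned_sequence real_id
instance (aligned_sequence : String) (real_id : Int) (out : Option Int) : Decidable (Spec_get_residue_id_in_aligned_sequence aligned_sequence real_id out) := by unfold Spec_get_residue_id_in_aligned_sequence; infer_instance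

-- ===== CLAIM =====
def Claim_equal_get_residue_id_in_aligned_sequence : Prop := ∀ (aligned_sequence : String) (real_id : Int), Dom_get_residue_id_in_aligned_sequence aligned_sequence real_id → Pre_get_residue_id_in_aligned_sequence aligned_sequence real_id → Spec_get_residue_id_in_aligned_sequence aligned_sequence real_id (get_residue_id_in_aligned_sequence aligned_sequence real_id)

-- ===== LEMMAS AND PROOFS =====
theorem pvA_loop_eq (l : List (Int × Char)) :
    ∀ (rid cnt : Int),
      pvA_loop l rid cnt =
        if 0 ≤ rid - cnt then
          (l.filterMap (fun ip => if ip.2 ≠ '-' then some ip.1 else none))[(rid - cnt).toNat]?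
        else none := by
  induction l with
  | nil => intro rid cnt; simp [pvA_loop]
  | cons hd tl ih =>
    intro rid cnt
    obtain ⟨i, p⟩ := hd
    by_cases hp : p ≠ '-'
    · by_cases hc : cnt = rid
      · subst hc
        simp [pvA_loop, hp]
      · have h2 := ih rid (cnt + 1)
        by_cases h0 : 0 ≤ rid - cnt
        · have ht : (rid - cnt).toNat = ((rid - (cnt + 1)).toNat) + 1 := by omega
          simp [pvA_loop, hp, hc, h2, ht]
          rw [if_pos (show cnt < rid by omega), if_pos (show cnt ≤ rid by omega)]
        · simp [pvA_loop, hp, hc, h2]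
          rw [if_neg (show ¬ cnt < rid by omega), if_neg (show ¬ cnt ≤ rid by omega)]
    · simp only [ne_eq, not_not] at hp
      subst hp
      simp only [pvA_loop, ih]
      simp

theorem get_residue_id_in_aligned_sequence_spec : Claim_equal_get_residue_id_in_aligned_sequence := by
  intro s rid _ _
  unfold Spec_get_residue_id_in_aligned_sequence get_residue_id_in_aligned_sequence
    get_residue_id_in_aligned_sequence_alt
  rw [pvA_loop_eq]
  simp only [sub_zero]
  set L := (PySem.List.enumerate s.toList).filterMap
      (fun ip => if ip.2 ≠ '-' then some ip.1 else none) with hL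
  by_cases h0 : 0 ≤ rid
  · rw [if_pos h0]
    by_cases hlt : rid < (L.length : Int)
    · rw [if_pos ⟨h0, hlt⟩]
    · rw [if_neg (fun hc => hlt hc.2)]
      exact List.getElem?_eq_none (by omega)
  · rw [if_neg h0, if_neg (fun hc => h0 hc.1)]
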